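-- pv_equiv track=rewrite | github.com/Fondamenti18/fondamenti-di-programmazione | students/1602302/homework04/program01.py | antenati
-- ===== SOURCE A (Python) =====
-- def antenati(diz,key,antenaticount,out,grado):
--
--     out[key]=antenaticount
--
--     if figli(diz[key])==grado:
--         antenaticount+=1
--
--     if diz[key]!=[]:
--         for items in diz[key]:
--             antenati(diz,items,antenaticount,out,grado)
--     else:
--         out[key]=antenaticount
--     return out
--
-- def figli(lista):
--     return len(lista)
-- ===== SOURCE B (Python) =====
-- def antenati(diz, key, antenaticount, out, grado):
--     stack = [(key, antenaticount)]
--     while stack: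
--         k, c = stack.pop()
--         out[k] = c
--         ch = diz[k]
--         c2 = c + 1 if len(ch) == grado else c
--         if ch:
--             for child in reversed(ch):
--                 stack.append((child, c2))
--         else:
--             out[k] = c2
--     return out
-- ===== Notes on version B (the rewrite author's own statement) =====
-- stated objective: alternative
-- what changed: The recursive DFS is replaced by an iterative loop over an explicit stack of (node, count) pairs (pop, write, push children with the possibly-incremented count, leaf overwrite inline).
import Mathlib
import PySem

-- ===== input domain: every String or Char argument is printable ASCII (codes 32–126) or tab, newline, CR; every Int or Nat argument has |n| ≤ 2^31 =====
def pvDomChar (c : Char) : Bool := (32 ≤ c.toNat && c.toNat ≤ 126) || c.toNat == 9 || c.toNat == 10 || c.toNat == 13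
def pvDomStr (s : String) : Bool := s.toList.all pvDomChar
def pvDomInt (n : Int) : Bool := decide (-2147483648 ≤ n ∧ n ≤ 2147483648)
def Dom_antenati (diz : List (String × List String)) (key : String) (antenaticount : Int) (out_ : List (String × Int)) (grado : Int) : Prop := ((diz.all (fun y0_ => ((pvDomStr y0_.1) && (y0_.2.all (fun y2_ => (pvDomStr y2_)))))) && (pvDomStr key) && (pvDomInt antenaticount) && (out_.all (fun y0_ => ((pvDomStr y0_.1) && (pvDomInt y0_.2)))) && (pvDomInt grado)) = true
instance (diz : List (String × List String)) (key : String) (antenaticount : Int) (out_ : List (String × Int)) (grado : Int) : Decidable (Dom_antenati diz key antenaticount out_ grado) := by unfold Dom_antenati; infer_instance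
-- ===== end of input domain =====

-- B replaces A's recursive DFS by an iterative loop over an explicit stack of (node, count) pairs;
-- both A and B mutate the `out` dict in place in Python (same writes, in the same order) — the
-- equivalence proved here is about the return value.

-- ===== PORT A =====
-- Recursive DFS exactly as A writes it; the Nat fuel (diz.length + 1, never exhausted on the
-- inputs Pre_ admits) only makes the recursion total.
def antenatiA (diz : PySem.Dict String (List String)) (grado : Int) : Nat → String → Int → PySem.Dict String Int → PySem.Dict String Int
  | 0, _, _, out => out
  | fuel + 1, key, antenaticount, out =>
    let out1 := out.insert key antenaticount                    -- out[key] = antenaticount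
    let ch := diz.getD key []                                   -- diz[key] (present under Pre_)
    let ac := if (ch.length : Int) = grado then antenaticount + 1 else antenaticount
    if ch ≠ [] then
      ch.foldl (fun o item => antenatiA diz grado fuel item ac o) out1
    else
      out1.insert key ac                                        -- leaf: out[key] = antenaticount

def antenati (diz : List (String × List String)) (key : String) (antenaticount : Int) (out_ : List (String × Int)) (grado : Int) : List (String × Int) :=
  (antenatiA (PySem.Dict.ofList diz) grado (diz.length + 1) key antenaticount (PySem.Dict.ofList out_)).items

-- ===== PORT B =====
-- Iterative DFS over an explicit stack, modeled top-first (Python's reversed push then pop from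
-- the end = prepend the children in order).  Each stack entry carries a Nat fuel (totality guard
-- only); maxCh bounds every child list, which gives the termination measure.
def maxCh (diz : PySem.Dict String (List String)) : Nat :=
  (diz.items.map (fun p => p.2.length)).foldr max 0

theorem le_foldr_max {a : Nat} {l : List Nat} (h : a ∈ l) : a ≤ l.foldr max 0 := by
  induction l with
  | nil => cases h
  | cons x xs ih =>
    rcases List.mem_cons.mp h with rfl | hx
    · exact Nat.le_max_left _ _
    · exact le_trans (ih hx) (Nat.le_max_right _ _)

theorem getD_length_le_maxCh (diz : PySem.Dict String (List String)) (k : String) :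
    (diz.getD k []).length ≤ maxCh diz := by
  rw [PySem.Dict.getD_eq_get?_getD]
  cases h : diz.get? k with
  | none => simp
  | some v =>
    have hv := PySem.Dict.mem_items_of_get?_eq_some (d := diz) h
    exact le_foldr_max (List.mem_map_of_mem hv)

def antenatiB (diz : PySem.Dict String (List String)) (grado : Int) (stack : List (Nat × String × Int)) (out : PySem.Dict String Int) : PySem.Dict String Int :=
  match stack with
  | [] => out                                                   -- while stack: … done
  | (0, _, _) :: rest => antenatiB diz grado rest out           -- fuel guard (unreachable under Pre_)
  | (fuel + 1, k, c) :: rest =>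
    let out1 := out.insert k c                                  -- out[k] = c
    let ch := diz.getD k []                                     -- ch = diz[k]
    let c2 := if (ch.length : Int) = grado then c + 1 else c
    if ch ≠ [] then
      antenatiB diz grado (ch.map (fun x => (fuel, x, c2)) ++ rest) out1   -- push children
    else
      antenatiB diz grado rest (out1.insert k c2)               -- leaf: out[k] = c2
termination_by (stack.map (fun e => (maxCh diz + 2) ^ e.1)).sum
decreasing_by
  · simp
  · simp only [Nat.succ_eq_add_one, List.map_append, List.map_map, List.sum_append, List.map_cons, List.sum_cons]
    have hle : ch.length ≤ maxCh diz := getD_length_le_maxCh diz k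
    have hmap : (ch.map ((fun e => (maxCh diz + 2) ^ e.1) ∘ fun x => (fuel, x, c2))).sum
        = ch.length * (maxCh diz + 2) ^ fuel := by
      simp [Function.comp_def, List.map_const', List.sum_replicate, smul_eq_mul, Nat.mul_comm]
    rw [hmap]
    have hpos : 0 < (maxCh diz + 2) ^ fuel := Nat.pow_pos (by omega)
    have hlt : ch.length * (maxCh diz + 2) ^ fuel < (maxCh diz + 2) ^ (fuel + 1) := by
      rw [pow_succ]
      calc ch.length * (maxCh diz + 2) ^ fuel
          < (maxCh diz + 2) * (maxCh diz + 2) ^ fuel := by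
            exact Nat.mul_lt_mul_of_lt_of_le (by omega) (le_refl _) hpos
        _ = (maxCh diz + 2) ^ fuel * (maxCh diz + 2) := by ring
    omega
  · have hpos : 0 < (maxCh diz + 2) ^ (fuel + 1) := Nat.pow_pos (by omega)
    simp only [Nat.succ_eq_add_one, List.map_cons, List.sum_cons]
    omega

def antenati_alt (diz : List (String × List String)) (key : String) (antenaticount : Int) (out_ : List (String × Int)) (grado : Int) : List (String × Int) :=
  (antenatiB (PySem.Dict.ofList diz) grado [(diz.length + 1, key, antenaticount)] (PySem.Dict.ofList out_)).items

-- ===== PRECONDITION & SPEC =====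
-- Pre_ states exactly where the Python A returns: the dicts are genuine dicts (distinct keys) and
-- some sub-dict S of diz contains key, is closed under children and is acyclic (every nonempty
-- subset of S has an entry with no child inside it) — otherwise A hits a missing key (KeyError)
-- or recurses forever on a cycle (RecursionError).
def Pre_antenati (diz : List (String × List String)) (key : String) (antenaticount : Int) (out_ : List (String × Int)) (grado : Int) : Prop :=
  (diz.map Prod.fst).Nodup ∧ (out_.map Prod.fst).Nodup ∧
  ∃ S ∈ diz.sublists, key ∈ S.map Prod.fst ∧
    (∀ p ∈ S, ∀ c ∈ p.2, c ∈ S.map Prod.fst) ∧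
    (∀ T ∈ S.sublists, T ≠ [] → ∃ p ∈ T, ∀ c ∈ p.2, c ∉ T.map Prod.fst)
instance (diz : List (String × List String)) (key : String) (antenaticount : Int) (out_ : List (String × Int)) (grado : Int) : Decidable (Pre_antenati diz key antenaticount out_ grado) := by unfold Pre_antenati; infer_instance

def pvWitness_antenati : (List (String × List String)) × String × Int × (List (String × Int)) × Int :=
  ([("a", ["b", "c"]), ("b", []), ("c", [])], "a", 0, [], 2)

def Spec_antenati (diz : List (String × List String)) (key : String) (antenaticount : Int) (out_ : List (String × Int)) (grado : Int) (out : List (String × Int)) : Prop := out = antenati_alt diz key antenaticount out_ grado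
instance (diz : List (String × List String)) (key : String) (antenaticount : Int) (out_ : List (String × Int)) (grado : Int) (out : List (String × Int)) : Decidable (Spec_antenati diz key antenaticount out_ grado out) := by unfold Spec_antenati; infer_instance

-- ===== CLAIM (what is proved, stated in full; the proofs are below) =====
def Claim_equal_antenati : Prop := ∀ (diz : List (String × List String)) (key : String) (antenaticount : Int) (out_ : List (String × Int)) (grado : Int), Dom_antenati diz key antenaticount out_ grado → Pre_antenati diz key antenaticount out_ grado → Spec_antenati diz key antenaticount out_ grado (antenati diz key antenaticount out_ grado)

-- ===== LEMMAS AND PROOFS =====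

-- Popping one stack entry runs A's whole recursion on it, then continues with the rest.
theorem antenatiB_cons (diz : PySem.Dict String (List String)) (grado : Int) :
    ∀ (fuel : Nat) (k : String) (c : Int) (rest : List (Nat × String × Int)) (out : PySem.Dict String Int),
      antenatiB diz grado ((fuel, k, c) :: rest) out
        = antenatiB diz grado rest (antenatiA diz grado fuel k c out) := by
  intro fuel
  induction fuel with
  | zero => intro k c rest out; rw [antenatiB]; rfl
  | succ f ih =>
    intro k c rest out
    have hfold : ∀ (c2 : Int) (ch : List String) (rest : List (Nat × String × Int)) (out : PySem.Dict String Int),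
        antenatiB diz grado (ch.map (fun x => (f, x, c2)) ++ rest) out
          = antenatiB diz grado rest (ch.foldl (fun o item => antenatiA diz grado f item c2 o) out) := by
      intro c2 ch
      induction ch with
      | nil => intro rest out; simp
      | cons x xs ihx =>
        intro rest out
        simp only [List.map_cons, List.cons_append, List.foldl_cons]
        rw [ih, ihx]
    rw [antenatiB, antenatiA]
    by_cases hch : diz.getD k [] = []
    · simp [hch]
    · simp only [hch, ne_eq, not_false_iff, if_pos]
      rw [hfold]

theorem antenatiB_nil (diz : PySem.Dict String (List String)) (grado : Int) (out : PySem.Dict String Int) :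
    antenatiB diz grado [] out = out := by rw [antenatiB]

-- ===== VERDICT (by name: the statement is the Claim_ definition above) =====
theorem antenati_spec : Claim_equal_antenati := by
  intro diz key antenaticount out_ grado _ _
  unfold Spec_antenati antenati antenati_alt
  rw [antenatiB_cons, antenatiB_nil]
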